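-- pv_equiv track=rewrite | github.com/b2sdev/CodeSignal-Solutions | TheCore/D-Loop-Tunnel/increaseNumberRoundness.py | solution
-- ===== SOURCE A (Python) =====
-- def solution(n):
--     num = str(n)[::-1]
--     roundness = 0
--     left = 0
--     right = 0
--     if num[right] == "0":
--         while right < len(num) and num[right] == "0":
--             right += 1
--         roundness = right - left
--         left = right
--     if right < len(num):
--         right += 1
--     while right < len(num) and num[right] != "0":
--         right += 1
--     return right < len(num) and right - left > 0
-- ===== SOURCE B (Python) =====
-- def solution(n):
--     return "0" in str(n).rstrip("0")
-- ===== Notes on version B (the rewrite author's own statement) =====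
-- stated objective: simpler
-- what changed: Replaced the two index-bookkeeping while-loops over the reversed string with a one-liner: strip trailing zeros from str(n) and test whether a '0' remains.
import Mathlib
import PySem

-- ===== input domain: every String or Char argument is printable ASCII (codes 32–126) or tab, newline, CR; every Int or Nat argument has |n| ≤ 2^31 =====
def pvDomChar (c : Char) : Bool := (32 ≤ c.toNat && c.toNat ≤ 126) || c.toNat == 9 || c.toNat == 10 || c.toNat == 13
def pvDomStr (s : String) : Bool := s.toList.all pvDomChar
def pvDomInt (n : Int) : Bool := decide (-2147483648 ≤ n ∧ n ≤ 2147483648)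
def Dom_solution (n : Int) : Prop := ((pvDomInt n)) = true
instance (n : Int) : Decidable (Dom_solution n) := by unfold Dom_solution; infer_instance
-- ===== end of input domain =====

-- B replaces A's two index-walking while-loops with "strip trailing zeros, then test for a remaining '0'" (objective: simpler).

-- ===== PORT A =====
-- while right < len(num) and num[right] == "0": right += 1
def solWhileZero (num : List Char) (right : Nat) : Nat :=
  if h : right < num.length ∧ num.getD right ' ' == '0' then solWhileZero num (right + 1) else right
termination_by num.length - right
decreasing_by omega

-- while right < len(num) and num[right] != "0": right += 1
def solWhileNonZero (num : List Char) (right : Nat) : Nat :=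
  if h : right < num.length ∧ !(num.getD right ' ' == '0') then solWhileNonZero num (right + 1) else right
termination_by num.length - right
decreasing_by omega

def solution (n : Int) : Bool :=
  let num := (PySem.Int.toChars n).reverse   -- str(n)[::-1]; num is never empty (str(n) ≠ ""), so getD below is exact for num[right]
  let left : Nat := 0
  let right : Nat := 0
  let (left, right) :=
    if num.getD right ' ' == '0' then
      let right := solWhileZero num right
      -- roundness := right - left (dead: the return value uses right - left directly); left := right
      (right, right)
    else (left, right)
  let right := if right < num.length then right + 1 else right
  let right := solWhileNonZero num right
  decide (right < num.length ∧ right - left > 0)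

-- ===== PORT B =====
def solution_alt (n : Int) : Bool :=
  let s := PySem.Int.toChars n                              -- str(n)
  let stripped := (s.reverse.dropWhile (fun c => c == '0')).reverse  -- s.rstrip("0"): hand port (drop the trailing run of '0'), exact
  PySem.Chars.isIn ['0'] stripped                           -- "0" in stripped

-- ===== PRECONDITION & SPEC =====
def Spec_solution (n : Int) (out : Bool) : Prop := out = solution_alt n
instance (n : Int) (out : Bool) : Decidable (Spec_solution n out) := by unfold Spec_solution; infer_instance

-- ===== CLAIM (what is proved, stated in full; the proofs are below) =====
def Claim_equal_solution : Prop := ∀ (n : Int), Dom_solution n → Spec_solution n (solution n)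

-- ===== LEMMAS AND PROOFS =====

theorem solWhileZero_eq (num : List Char) (right : Nat) :
    solWhileZero num right = right + ((num.drop right).takeWhile (fun c => c == '0')).length := by
  fun_induction solWhileZero with
  | case1 r h ih =>
      obtain ⟨hr, h0⟩ := h
      have hg : (num[r] == '0') = true := by simpa [List.getD_eq_getElem?_getD, hr] using h0
      rw [ih, List.drop_eq_getElem_cons hr, List.takeWhile_cons]
      simp [hg]; omega
  | case2 r h =>
      by_cases hr : r < num.length
      · have hg : (num[r] == '0') = false := by
          have h0 := not_and.mp h hr
          simpa [List.getD_eq_getElem?_getD, hr] using h0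
        rw [List.drop_eq_getElem_cons hr, List.takeWhile_cons]
        simp [hg]
      · rw [List.drop_eq_nil_of_le (by omega)]; simp

theorem solWhileNonZero_eq (num : List Char) (right : Nat) :
    solWhileNonZero num right = right + ((num.drop right).takeWhile (fun c => !(c == '0'))).length := by
  fun_induction solWhileNonZero with
  | case1 r h ih =>
      obtain ⟨hr, h0⟩ := h
      have hg : (num[r] == '0') = false := by
        simpa [List.getD_eq_getElem?_getD, hr] using h0
      rw [ih, List.drop_eq_getElem_cons hr, List.takeWhile_cons]
      simp [hg]; omega
  | case2 r h =>
      by_cases hr : r < num.length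
      · have hg : (num[r] == '0') = true := by
          have h0 := not_and.mp h hr
          simpa [List.getD_eq_getElem?_getD, hr] using h0
        rw [List.drop_eq_getElem_cons hr, List.takeWhile_cons]
        simp [hg]
      · rw [List.drop_eq_nil_of_le (by omega)]; simp

theorem dropWhile_eq_drop_len_takeWhile {α : Type} (p : α → Bool) (l : List α) :
    l.dropWhile p = l.drop (l.takeWhile p).length := by
  induction l with
  | nil => rfl
  | cons c t ih =>
      by_cases h : p c <;> simp [h, ih]

theorem takeWhile_stop {α : Type} (p : α → Bool) (l : List α)
    (h : (l.takeWhile p).length < l.length) : p (l[(l.takeWhile p).length]'h) = false := by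
  induction l with
  | nil => simp at h
  | cons c t ih =>
      by_cases hc : p c
      · have h' : (t.takeWhile p).length < t.length := by
          simpa [List.takeWhile_cons, hc, Nat.succ_lt_succ_iff] using h
        simpa [List.takeWhile_cons, hc] using ih h'
      · simp [hc]

theorem len_takeWhile_not_lt_iff (l : List Char) :
    ((l.takeWhile (fun c => !(c == '0'))).length < l.length) ↔ '0' ∈ l := by
  induction l with
  | nil => simp
  | cons c t ih =>
      by_cases h : c = '0'
      · subst h
        simp
      · simp [h, ih, show ¬ ('0' = c) from fun hh => h hh.symm]

-- phases 2-3 of A's body, as a function of left = right = (takeWhile length)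
theorem solution_tail_eq (num : List Char) (z : Nat)
    (hz : z = (num.takeWhile (fun c => c == '0')).length) :
    decide (solWhileNonZero num (if z < num.length then z + 1 else z) < num.length ∧
            solWhileNonZero num (if z < num.length then z + 1 else z) - z > 0)
    = decide ('0' ∈ num.dropWhile (fun c => c == '0')) := by
  have hzle : z ≤ num.length := hz ▸ (List.takeWhile_prefix _).length_le
  rw [dropWhile_eq_drop_len_takeWhile, ← hz]
  by_cases hlt : z < num.length
  · have hdz : num.drop z = num[z] :: num.drop (z + 1) := List.drop_eq_getElem_cons hlt
    have hpz : (num[z] == '0') = false := by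
      have := takeWhile_stop (fun c => c == '0') num (hz ▸ hlt)
      simpa [← hz] using this
    simp only [if_pos hlt, solWhileNonZero_eq, hdz]
    have hmem : ('0' ∈ num[z] :: num.drop (z + 1)) ↔ '0' ∈ num.drop (z + 1) := by
      simp only [List.mem_cons, or_iff_right_iff_imp]
      intro h; exfalso; simp [← h] at hpz
    have hlen : (num.drop (z + 1)).length = num.length - (z + 1) := List.length_drop
    have hios := len_takeWhile_not_lt_iff (num.drop (z + 1))
    rw [hlen] at hios
    simp only [decide_eq_decide, hmem, ← hios]
    omega
  · have hz' : z = num.length := by omega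
    rw [if_neg hlt, solWhileNonZero_eq, List.drop_eq_nil_of_le (by omega)]
    simp [hz']

theorem solution_alt_eq (n : Int) :
    solution_alt n = decide ('0' ∈ ((PySem.Int.toChars n).reverse.dropWhile (fun c => c == '0'))) := by
  unfold solution_alt
  rw [Bool.eq_iff_iff]
  simp only [decide_eq_true_iff]
  rw [PySem.Chars.isIn_iff_infix, List.singleton_infix_iff, List.mem_reverse]

-- ===== VERDICT (by name: the statement is the Claim_ definition above) =====
theorem solution_spec : Claim_equal_solution := by
  intro n _
  unfold Spec_solution solution
  rw [solution_alt_eq]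
  set num := (PySem.Int.toChars n).reverse with hnum
  by_cases h0 : num.getD 0 ' ' == '0'
  · simp only [h0, if_pos]
    exact solution_tail_eq num _ (by rw [solWhileZero_eq]; simp)
  · simp only [h0, Bool.false_eq_true, if_false]
    refine solution_tail_eq num 0 ?_
    cases hn : num with
    | nil => simp
    | cons c t =>
        rw [hn] at h0
        have : (c == '0') = false := by simpa [List.getD] using h0
        simp [this]
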